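-- pv_equiv track=rewrite | github.com/grantmwilliams/Useful-Snippets | src/itertools_ext/dict_roundrobin.py | dict_roundrobin
-- ===== SOURCE A (Python) =====
-- from collections import deque
-- from itertools import cycle, islice, repeat
-- from typing import Any, Dict, Generator, List, Tuple, Union
--
-- Pair = Tuple[Any, Any]
--
-- Record = Dict[Any, Any]
--
-- def dict_roundrobin(d: Dict[Any, List[Any]], orient: str) -> Union[Generator[Pair, None, None], Generator[Record, None, None]]:
--     """
--     Return an iterable yielding column value pairs from a dictionary of lists. The iterable can
--     return pairs as a generator of (key, value) tuples, or a generator of dicts with only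
--     non-exhausted key-value pairs.
--
--     parameters:
--         d (dict[Any, list[Any]]): dictionary of {key: [value]}
--         orient str: "pairs" or "records"
--             `"pairs"` returns a generator of (key, value) tuples (`Record`s)
--             `"records"` returns a generator of sub dict records with non-exhausted key-value pairs (`Record`s)
--
--     Examples:
--     >>> data = {
--             'Col_1': ['1a', '1b', '1c'],
--             'Col_2': ['2a', '2b'],
--             'Col_3': [3.0]
--         }
--     >>> list(dict_roundrobin(data, orient="records"))
--     >>> [
--             {
--                 'Col_1': '1a',
--                 'Col_2': '2a',
--                 'Col_3': 3.0
--             },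
--             {
--                 'Col_1': '1a',
--                 'Col_2': '2a'
--             },
--             {
--                 'Col_1': 1
--             }
--         ]
--
--     >>> list(dict_roundrobin(data, orient="pairs"))
--         [
--             ('Col_1', 1),
--             ('Col_2', 2),
--             ('Col_3', 3.0),
--             ('Col_1', 1),
--             ('Col_2', 2),
--             ('Col_1', 1)
--         ]
--     """
--     if not isinstance(d, dict):
--         raise ValueError(f"dict_roundrobin(): `d` must be a dictionary of lists. `d` was of non-dictionary type: {type(d)}.")
--
--     if not all(isinstance(v, list) for v in d.values()):
--         bad_kvs = "\n".join(f"{k}: {type(v)}" for k, v in d.items() if not isinstance(v, list))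
--         raise ValueError(f"dict_roundrobin(): `d` must be a dictionary of lists. Non list records found:\n{bad_kvs}.")
--
--     num_active = len(d.keys())
--     nexts = cycle(iter(it).__next__ for it in [zip(repeat(k), v) for k, v in d.items()])
--
--     if orient == "pairs":
--         d = deque(maxlen=0)
--         pairs = True
--     elif orient == "records":
--         d = deque(maxlen=num_active)
--         pairs = False
--     else:
--         raise ValueError(f"orient must be `'records'` or `'pairs'` '{orient}' is not valid.")
--
--     while num_active:
--         try:
--             for next in nexts:
--                 if pairs:
--                     yield next()
--                 else:
--                     if len(d) == num_active:
--                         yield dict(list(d))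
--                         d.clear()
--                     d.append(next())
--         except StopIteration:
--             # Remove the iterator we just exhausted from the cycle.
--             num_active -= 1
--             nexts = cycle(islice(nexts, num_active))
-- ===== SOURCE B (Python) =====
-- def dict_roundrobin(d, orient):
--     """
--     Round-robin interleave a dict of lists, by direct indexed traversal:
--     round i visits every key whose list still has an i-th element.
--     Matches A on BOTH orients ('pairs' and 'records'), including the
--     partial final round and key order in 'records' mode.
--     """
--     if not isinstance(d, dict):
--         raise ValueError(f"dict_roundrobin(): `d` must be a dictionary of lists. `d` was of non-dictionary type: {type(d)}.")
--
--     if not all(isinstance(v, list) for v in d.values()):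
--         bad_kvs = "\n".join(f"{k}: {type(v)}" for k, v in d.items() if not isinstance(v, list))
--         raise ValueError(f"dict_roundrobin(): `d` must be a dictionary of lists. Non list records found:\n{bad_kvs}.")
--
--     if orient not in ("pairs", "records"):
--         raise ValueError(f"orient must be `'records'` or `'pairs'` '{orient}' is not valid.")
--
--     keys = list(d)
--     max_len = max((len(v) for v in d.values()), default=0)
--     for i in range(max_len):
--         if orient == "pairs":
--             for k in keys:
--                 if i < len(d[k]):
--                     yield (k, d[k][i])
--         else:
--             yield {k: d[k][i] for k in keys if i < len(d[k])}
-- ===== Notes on version B (the rewrite author's own statement) =====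
-- stated objective: simpler
-- what changed: Replaced the cycle-of-iterators round-robin (deque flushing, islice removal of exhausted iterators) by a direct indexed traversal: loop round index i up to the longest list and emit the entries whose lists still reach i; B reproduces A exactly in BOTH orients, and Pre_ excludes orient='records' only because A's dict-valued yields there cannot be expressed as values of the task's fixed return type list[tuple[str,str]] / List (String x String), and other orients because A raises ValueError.
-- outside the precondition, e.g. on dict_roundrobin({'a': ['x']}, 'rows'): A raises ValueError, B raises ValueError
import Mathlib
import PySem

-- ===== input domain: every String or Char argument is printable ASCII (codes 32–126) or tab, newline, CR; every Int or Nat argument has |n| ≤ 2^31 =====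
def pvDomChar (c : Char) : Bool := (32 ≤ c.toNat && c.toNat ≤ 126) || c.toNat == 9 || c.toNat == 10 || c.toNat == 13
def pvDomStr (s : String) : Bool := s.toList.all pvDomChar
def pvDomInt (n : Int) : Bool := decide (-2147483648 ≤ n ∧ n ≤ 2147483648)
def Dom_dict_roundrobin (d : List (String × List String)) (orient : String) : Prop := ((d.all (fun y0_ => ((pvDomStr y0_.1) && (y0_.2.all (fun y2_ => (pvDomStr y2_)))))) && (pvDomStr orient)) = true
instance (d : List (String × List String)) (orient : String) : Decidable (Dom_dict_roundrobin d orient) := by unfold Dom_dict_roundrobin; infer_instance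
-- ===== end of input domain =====

-- B replaces A's cycle-of-iterators round-robin (with islice removal of exhausted
-- iterators) by a direct indexed traversal: loop round index i up to the longest list
-- and emit (k, d[k][i]) for every key whose list still reaches i (objective: simpler).
-- The Python B reproduces A in BOTH orients; this file's claim covers 'pairs', the
-- only orient whose output is representable in the declared return type (see Pre_).

-- ===== PORT A =====
-- A's while/for loop over `nexts`: state = the cycle of live iterators in current
-- cyclic order, each iterator = (key, remaining values).  A nonempty head yields its
-- next pair and moves, advanced, to the end of the cycle; an exhausted head raises
-- StopIteration and `cycle(islice(nexts, num_active))` removes it, restarting right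
-- after it — i.e. the state becomes the tail.
def rrLoopA : List (String × List String) → List (String × String)
  | [] => []
  | (k, vs) :: t =>
    match vs with
    | [] => rrLoopA t
    | v :: rest => (k, v) :: rrLoopA (t ++ [(k, rest)])
termination_by L => (L.map (fun p => p.2.length)).sum + L.length
decreasing_by
  all_goals simp [List.sum_append] <;> omega

def dict_roundrobin (d : List (String × List String)) (orient : String) : List (String × String) :=
  if orient = "pairs" then rrLoopA d
  else []  -- 'records' yields dicts (no value of the declared pair type exists); other orients raise ValueError: both outside Pre_

-- ===== PORT B =====
-- round i of B's loop: (k, d[k][i]) for each key in order whose list reaches index i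
def rrPick (L : List (String × List String)) (i : Nat) : List (String × String) :=
  L.filterMap (fun p => (p.2[i]?).map (fun v => (p.1, v)))

def dict_roundrobin_alt (d : List (String × List String)) (orient : String) : List (String × String) :=
  if orient = "pairs" then
    (List.range ((d.map (fun p => p.2.length)).foldl max 0)).flatMap (rrPick d)
  else []  -- as in A's port: 'records' output is not expressible in the pair type, invalid orients raise; both outside Pre_

-- ===== PRECONDITION & SPEC =====
-- Pre_ excludes orient ≠ "pairs": for orient = "records" A yields dict objects, which are
-- not values of this task's declared return type list[tuple[str,str]] / List (String × String),
-- so no port can represent (let alone match) them — the Python B nevertheless reproduces A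
-- there exactly (see Source B and the cited example); for every other orient A raises ValueError.
def Pre_dict_roundrobin (d : List (String × List String)) (orient : String) : Prop :=
  orient = "pairs"
instance (d : List (String × List String)) (orient : String) : Decidable (Pre_dict_roundrobin d orient) := by unfold Pre_dict_roundrobin; infer_instance

def pvWitness_dict_roundrobin : (List (String × List String)) × String :=
  ([("a", ["x", "y"]), ("b", ["z"])], "pairs")

def Spec_dict_roundrobin (d : List (String × List String)) (orient : String) (out : List (String × String)) : Prop := out = dict_roundrobin_alt d orient
instance (d : List (String × List String)) (orient : String) (out : List (String × String)) : Decidable (Spec_dict_roundrobin d orient out) := by unfold Spec_dict_roundrobin; infer_instance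

-- ===== CLAIM (what is proved, stated in full; the proofs are below) =====
def Claim_equal_dict_roundrobin : Prop := ∀ (d : List (String × List String)) (orient : String), Dom_dict_roundrobin d orient → Pre_dict_roundrobin d orient → Spec_dict_roundrobin d orient (dict_roundrobin d orient)

-- ===== LEMMAS AND PROOFS =====

-- survivors of one round, advanced past their head, in original order
def rrAdv (L : List (String × List String)) : List (String × List String) :=
  L.filterMap (fun p => match p.2 with
    | [] => none
    | _ :: rest => some (p.1, rest))

theorem rrLoopA_round_aux (L R : List (String × List String)) :
    rrLoopA (L ++ R) = rrPick L 0 ++ rrLoopA (R ++ rrAdv L) := by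
  induction L generalizing R with
  | nil => simp [rrPick, rrAdv]
  | cons h t ih =>
    obtain ⟨k, vs⟩ := h
    cases vs with
    | nil =>
      simpa [rrLoopA, rrPick, rrAdv] using ih R
    | cons v rest =>
      have := ih (R ++ [(k, rest)])
      simp only [List.cons_append, rrLoopA, rrPick, rrAdv, List.filterMap_cons] at *
      simp [this, List.append_assoc]

theorem rrLoopA_round (L : List (String × List String)) :
    rrLoopA L = rrPick L 0 ++ rrLoopA (rrAdv L) := by
  simpa using rrLoopA_round_aux L []

theorem rrPick_succ (L : List (String × List String)) (i : Nat) :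
    rrPick L (i + 1) = rrPick (rrAdv L) i := by
  induction L with
  | nil => rfl
  | cons h t ih =>
    obtain ⟨k, vs⟩ := h
    cases vs with
    | nil => simpa [rrPick, rrAdv] using ih
    | cons v rest =>
      simp only [rrPick, rrAdv, List.filterMap_cons] at *
      simp [ih]

theorem foldl_max_le_iff (xs : List Nat) (a n : Nat) :
    xs.foldl max a ≤ n ↔ a ≤ n ∧ ∀ x ∈ xs, x ≤ n := by
  induction xs generalizing a with
  | nil => simp
  | cons x t ih =>
    simp only [List.foldl_cons, ih, List.mem_cons]
    constructor
    · rintro ⟨h1, h2⟩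
      exact ⟨le_trans (le_max_left _ _) h1, fun y hy => by
        rcases hy with rfl | hy
        · exact le_trans (le_max_right _ _) h1
        · exact h2 y hy⟩
    · rintro ⟨h1, h2⟩
      exact ⟨max_le h1 (h2 x (Or.inl rfl)), fun y hy => h2 y (Or.inr hy)⟩

theorem rrLoopA_eq_flatMap (n : Nat) (L : List (String × List String))
    (hn : (L.map (fun p => p.2.length)).foldl max 0 ≤ n) :
    rrLoopA L = (List.range n).flatMap (rrPick L) := by
  induction n generalizing L with
  | zero =>
    have hall : ∀ p ∈ L, p.2.length = 0 := by
      intro p hp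
      have := ((foldl_max_le_iff _ 0 0).mp hn).2 p.2.length (List.mem_map_of_mem hp)
      omega
    have h0 : rrPick L 0 = [] := by
      simp only [rrPick, List.filterMap_eq_nil_iff]
      intro p hp
      have := hall p hp
      simp [List.eq_nil_of_length_eq_zero this]
    have hadv : rrAdv L = [] := by
      simp only [rrAdv, List.filterMap_eq_nil_iff]
      intro p hp
      have := hall p hp
      simp [List.eq_nil_of_length_eq_zero this]
    rw [rrLoopA_round, h0, hadv]
    simp [rrLoopA]
  | succ m ih =>
    have hle : ∀ p ∈ L, p.2.length ≤ m + 1 :=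
      fun p hp => ((foldl_max_le_iff _ 0 (m + 1)).mp hn).2 p.2.length (List.mem_map_of_mem hp)
    have hadv : ((rrAdv L).map (fun p => p.2.length)).foldl max 0 ≤ m := by
      rw [foldl_max_le_iff]
      refine ⟨Nat.zero_le _, ?_⟩
      intro x hx
      simp only [List.mem_map] at hx
      obtain ⟨q, hq, rfl⟩ := hx
      simp only [rrAdv, List.mem_filterMap] at hq
      obtain ⟨p, hp, hpq⟩ := hq
      cases hvs : p.2 with
      | nil => simp [hvs] at hpq
      | cons v rest =>
        simp only [hvs] at hpq
        cases hpq
        have := hle p hp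
        rw [hvs] at this
        simpa using Nat.lt_succ_iff.mp (by simpa using this)
    rw [rrLoopA_round, ih (rrAdv L) hadv]
    rw [List.range_succ_eq_map, List.flatMap_cons, List.flatMap_map]
    congr 1
    apply List.flatMap_congr  -- pointwise: rrPick L (i+1) = rrPick (rrAdv L) i
    intro i _
    exact (rrPick_succ L i).symm

-- ===== VERDICT (by name: the statement is the Claim_ definition above) =====
theorem dict_roundrobin_spec : Claim_equal_dict_roundrobin := by
  intro d orient _ hpre
  unfold Spec_dict_roundrobin dict_roundrobin dict_roundrobin_alt
  rw [hpre]
  exact rrLoopA_eq_flatMap _ d le_rfl
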